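-- pv_equiv track=rewrite | github.com/whitemagic-ai/whitemagic-clean | whitemagic/core/intelligence/agentic/token_optimizer.py | extract_relevant_lines
-- ===== SOURCE A (Python) =====
-- def extract_relevant_lines(
--     content: str,
--     keywords: list[str],
--     context_lines: int = 3,
-- ) -> tuple[str, int]:
--     """Extract only lines relevant to keywords."""
--     lines = content.split("\n")
--     relevant_indices = set()
--
--     for i, line in enumerate(lines):
--         line_lower = line.lower()
--         if any(kw.lower() in line_lower for kw in keywords):
--             # Add this line + context
--             for j in range(max(0, i - context_lines), min(len(lines), i + context_lines + 1)):
--                 relevant_indices.add(j)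
--
--     if not relevant_indices:
--         return content[:500] + "\n...[no keyword matches]...", len(content) // 4
--
--     relevant = [lines[i] for i in sorted(relevant_indices)]
--     extracted = "\n".join(relevant)
--
--     original_tokens = len(content) // 4
--     new_tokens = len(extracted) // 4
--     saved = original_tokens - new_tokens
--
--     return extracted, saved
-- ===== SOURCE B (Python) =====
-- def extract_relevant_lines(
--     content: str,
--     keywords: list[str],
--     context_lines: int = 3,
-- ) -> tuple[str, int]:
--     """Extract only lines relevant to keywords (match indices + distance filter)."""
--     lines = content.split("\n")
--     kws = [kw.lower() for kw in keywords]
--     matches = [i for i, line in enumerate(lines)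
--                if any(kw in line.lower() for kw in kws)]
--     relevant = [line for i, line in enumerate(lines)
--                 if any(m - context_lines <= i <= m + context_lines for m in matches)]
--     if not relevant:
--         return content[:500] + "\n...[no keyword matches]...", len(content) // 4
--     extracted = "\n".join(relevant)
--     return extracted, len(content) // 4 - len(extracted) // 4
-- ===== Notes on version B (the rewrite author's own statement) =====
-- stated objective: alternative
-- what changed: Replaces the per-match context-index set accumulation plus final sort with two order-preserving comprehensions: collect the match indices once, then keep each line whose index lies within context_lines of some match (no set, no sort).
import Mathlib
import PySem

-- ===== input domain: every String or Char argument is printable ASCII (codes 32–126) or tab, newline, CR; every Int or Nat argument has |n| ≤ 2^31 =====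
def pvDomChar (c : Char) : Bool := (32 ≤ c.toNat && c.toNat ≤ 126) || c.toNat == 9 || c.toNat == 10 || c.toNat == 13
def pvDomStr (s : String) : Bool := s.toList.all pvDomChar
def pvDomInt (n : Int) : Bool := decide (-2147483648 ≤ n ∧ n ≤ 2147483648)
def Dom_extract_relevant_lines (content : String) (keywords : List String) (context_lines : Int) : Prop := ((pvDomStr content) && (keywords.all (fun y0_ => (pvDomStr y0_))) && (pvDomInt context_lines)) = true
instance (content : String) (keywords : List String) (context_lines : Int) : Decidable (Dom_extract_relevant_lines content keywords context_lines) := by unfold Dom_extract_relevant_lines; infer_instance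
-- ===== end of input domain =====

-- B keeps A's output/fallback/token logic but replaces the per-match context-index set plus sort with
-- two order-preserving passes: collect match indices, then keep lines within context_lines of a match
-- (objective: alternative decomposition, same cost class).

-- ===== PORT A =====
def extract_relevant_lines (content : String) (keywords : List String) (context_lines : Int) : String × Int :=
  let cs := content.toList
  let lines := PySem.Chars.splitOn cs ['\n']
  let relevant_indices : PySem.Set Int :=
    (PySem.List.enumerate lines).foldl
      (fun s p =>
        if keywords.any (fun kw => PySem.Chars.isIn (PySem.Chars.lower kw.toList) (PySem.Chars.lower p.2)) then
          (PySem.List.pyRange (max 0 (p.1 - context_lines)) (min (lines.length : Int) (p.1 + context_lines + 1))).foldl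
            (fun s j => s.add j) s
        else s)
      PySem.Set.empty
  if relevant_indices.isEmpty then
    (String.ofList (PySem.Chars.slice cs none (some 500) ++ "\n...[no keyword matches]...".toList),
      PySem.Int.floordiv (cs.length : Int) 4)
  else
    let extracted := PySem.Chars.join ['\n']
      ((PySem.List.sorted relevant_indices (fun j => j)).map (fun j => PySem.List.pyGetD lines j []))
    (String.ofList extracted,
      PySem.Int.floordiv (cs.length : Int) 4 - PySem.Int.floordiv (extracted.length : Int) 4)

-- ===== PORT B =====
def extract_relevant_lines_alt (content : String) (keywords : List String) (context_lines : Int) : String × Int :=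
  let cs := content.toList
  let lines := PySem.Chars.splitOn cs ['\n']
  let kws := keywords.map (fun kw => PySem.Chars.lower kw.toList)
  let matchIdxs :=
    ((PySem.List.enumerate lines).filter
      (fun p => kws.any (fun kw => PySem.Chars.isIn kw (PySem.Chars.lower p.2)))).map (fun p => p.1)
  let relevant :=
    ((PySem.List.enumerate lines).filter
      (fun p => matchIdxs.any (fun m => decide (m - context_lines ≤ p.1) && decide (p.1 ≤ m + context_lines)))).map (fun p => p.2)
  if relevant.isEmpty then
    (String.ofList (PySem.Chars.slice cs none (some 500) ++ "\n...[no keyword matches]...".toList),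
      PySem.Int.floordiv (cs.length : Int) 4)
  else
    let extracted := PySem.Chars.join ['\n'] relevant
    (String.ofList extracted,
      PySem.Int.floordiv (cs.length : Int) 4 - PySem.Int.floordiv (extracted.length : Int) 4)

-- ===== PRECONDITION & SPEC =====
def Spec_extract_relevant_lines (content : String) (keywords : List String) (context_lines : Int) (out : String × Int) : Prop := out = extract_relevant_lines_alt content keywords context_lines
instance (content : String) (keywords : List String) (context_lines : Int) (out : String × Int) : Decidable (Spec_extract_relevant_lines content keywords context_lines out) := by unfold Spec_extract_relevant_lines; infer_instance

-- ===== CLAIM (what is proved, stated in full; the proofs are below) =====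
def Claim_equal_extract_relevant_lines : Prop := ∀ (content : String) (keywords : List String) (context_lines : Int), Dom_extract_relevant_lines content keywords context_lines → Spec_extract_relevant_lines content keywords context_lines (extract_relevant_lines content keywords context_lines)

-- ===== LEMMAS AND PROOFS =====

lemma pv_enum_mem {α : Type} (xs : List α) (k : Int) (p : Int × α) :
    p ∈ PySem.List.enumerate xs k ↔ ∃ i : Nat, ∃ h : i < xs.length, p = (k + i, xs[i]) := by
  induction xs generalizing k with
  | nil => simp [PySem.List.enumerate]
  | cons x t ih =>
    simp only [PySem.List.enumerate, List.mem_cons, ih]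
    constructor
    · rintro (rfl | ⟨i, h, rfl⟩)
      · exact ⟨0, Nat.succ_pos _, by simp⟩
      · refine ⟨i + 1, Nat.succ_lt_succ h, ?_⟩
        simp only [List.getElem_cons_succ, Prod.mk.injEq]
        exact ⟨by push_cast; ring, trivial⟩
    · rintro ⟨i, h, rfl⟩
      cases i with
      | zero => left; simp
      | succ i =>
        right
        refine ⟨i, Nat.lt_of_succ_lt_succ h, ?_⟩
        simp only [List.getElem_cons_succ, Prod.mk.injEq]
        exact ⟨by push_cast; ring, trivial⟩

lemma pv_enum_pairwise {α : Type} (xs : List α) (k : Int) :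
    List.Pairwise (fun p q => p.1 < q.1) (PySem.List.enumerate xs k) := by
  induction xs generalizing k with
  | nil => simp [PySem.List.enumerate]
  | cons x t ih =>
    simp only [PySem.List.enumerate]
    refine List.Pairwise.cons (fun q hq => ?_) (ih (k + 1))
    obtain ⟨i, h, rfl⟩ := (pv_enum_mem t (k + 1) q).1 hq
    simp only
    omega

lemma pv_fold_mem (P : Int × List Char → Bool) (rng : Int × List Char → List Int)
    (l : List (Int × List Char)) (s0 : PySem.Set Int) (j : Int) :
    (j ∈ l.foldl (fun (s : PySem.Set Int) p => if P p then (rng p).foldl (fun s j => s.add j) s else s) s0) ↔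
      j ∈ s0 ∨ ∃ p ∈ l, P p = true ∧ j ∈ rng p := by
  induction l generalizing s0 with
  | nil => simp
  | cons p t ih =>
    simp only [List.foldl_cons, ih, List.mem_cons]
    have hupd : ∀ s : PySem.Set Int,
        (rng p).foldl (fun (s : PySem.Set Int) j => s.add j) s = PySem.Set.update s (rng p) :=
      fun _ => rfl
    by_cases h : P p = true
    · rw [if_pos h, hupd, PySem.Set.mem_update]
      constructor
      · rintro ((hj | hj) | ⟨q, hq, hqP, hqj⟩)
        · exact Or.inl hj
        · exact Or.inr ⟨p, Or.inl rfl, h, hj⟩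
        · exact Or.inr ⟨q, Or.inr hq, hqP, hqj⟩
      · rintro (hj | ⟨q, (rfl | hq), hqP, hqj⟩)
        · exact Or.inl (Or.inl hj)
        · exact Or.inl (Or.inr hqj)
        · exact Or.inr ⟨q, hq, hqP, hqj⟩
    · rw [if_neg h]
      constructor
      · rintro (hj | ⟨q, hq, hqP, hqj⟩)
        · exact Or.inl hj
        · exact Or.inr ⟨q, Or.inr hq, hqP, hqj⟩
      · rintro (hj | ⟨q, (rfl | hq), hqP, hqj⟩)
        · exact Or.inl hj
        · exact absurd hqP h
        · exact Or.inr ⟨q, hq, hqP, hqj⟩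

lemma pv_fold_nodup (P : Int × List Char → Bool) (rng : Int × List Char → List Int)
    (l : List (Int × List Char)) (s0 : PySem.Set Int) (h : List.Nodup s0) :
    List.Nodup (l.foldl (fun (s : PySem.Set Int) p => if P p then (rng p).foldl (fun (s : PySem.Set Int) j => s.add j) s else s) s0) := by
  induction l generalizing s0 with
  | nil => exact h
  | cons p t ih =>
    simp only [List.foldl_cons]
    have hupd : (rng p).foldl (fun (s : PySem.Set Int) j => s.add j) s0 = PySem.Set.update s0 (rng p) := rfl
    by_cases hp : P p = true
    · rw [if_pos hp, hupd]
      exact ih _ (PySem.Set.nodup_update s0 (rng p) h)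
    · rw [if_neg hp]
      exact ih _ h

theorem pv_main (content : String) (keywords : List String) (c : Int) :
    extract_relevant_lines content keywords c = extract_relevant_lines_alt content keywords c := by
  unfold extract_relevant_lines extract_relevant_lines_alt
  have hany : ∀ ls : List Char,
      ((keywords.map (fun kw => PySem.Chars.lower kw.toList)).any (fun kw => PySem.Chars.isIn kw ls))
        = keywords.any (fun kw => PySem.Chars.isIn (PySem.Chars.lower kw.toList) ls) := by
    intro ls
    rw [List.any_map]
    rfl
  simp only [hany]
  set cs := content.toList with hcs
  set lines := PySem.Chars.splitOn cs ['\n'] with hlines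
  set P : Int × List Char → Bool :=
    fun p => keywords.any (fun kw => PySem.Chars.isIn (PySem.Chars.lower kw.toList) (PySem.Chars.lower p.2)) with hP
  set E := PySem.List.enumerate lines 0 with hE
  set M := (E.filter P).map (fun p => p.1) with hM
  set Q : Int × List Char → Bool :=
    fun p => M.any (fun m => decide (m - c ≤ p.1) && decide (p.1 ≤ m + c)) with hQ
  set S := E.foldl
      (fun s p =>
        if P p then
          (PySem.List.pyRange (max 0 (p.1 - c)) (min (lines.length : Int) (p.1 + c + 1))).foldl
            (fun s j => s.add j) s
        else s)
      PySem.Set.empty with hS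
  -- membership characterisations
  have hMmem : ∀ m : Int, m ∈ M ↔ ∃ p ∈ E, P p = true ∧ p.1 = m := by
    intro m
    simp only [hM, List.mem_map, List.mem_filter]
    constructor
    · rintro ⟨p, ⟨hpE, hpP⟩, rfl⟩; exact ⟨p, hpE, hpP, rfl⟩
    · rintro ⟨p, hpE, hpP, rfl⟩; exact ⟨p, ⟨hpE, hpP⟩, rfl⟩
  have hSmem : ∀ j : Int, j ∈ S ↔
      ∃ m, m ∈ M ∧ (0 ≤ j ∧ j < (lines.length : Int) ∧ m - c ≤ j ∧ j ≤ m + c) := by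
    intro j
    rw [hS, pv_fold_mem P (fun p => PySem.List.pyRange (max 0 (p.1 - c)) (min (lines.length : Int) (p.1 + c + 1))) E PySem.Set.empty j]
    constructor
    · rintro (hj | ⟨p, hpE, hpP, hj⟩)
      · exact absurd hj (by simp [PySem.Set.empty])
      · rw [PySem.List.mem_pyRange_one] at hj
        refine ⟨p.1, (hMmem p.1).2 ⟨p, hpE, hpP, rfl⟩, ?_⟩
        rcases hj with ⟨h1, h2⟩
        rw [max_le_iff] at h1; rw [lt_min_iff] at h2
        omega
    · rintro ⟨m, hm, h0, hlen, hw1, hw2⟩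
      obtain ⟨p, hpE, hpP, rfl⟩ := (hMmem m).1 hm
      refine Or.inr ⟨p, hpE, hpP, ?_⟩
      rw [PySem.List.mem_pyRange_one, max_le_iff, lt_min_iff]
      omega
  set ys := (E.filter Q).map (fun p => p.1) with hys
  have hysmem : ∀ j : Int, j ∈ ys ↔
      (0 ≤ j ∧ j < (lines.length : Int)) ∧ ∃ m, m ∈ M ∧ (m - c ≤ j ∧ j ≤ m + c) := by
    intro j
    simp only [hys, List.mem_map, List.mem_filter]
    constructor
    · rintro ⟨p, ⟨hpE, hpQ⟩, rfl⟩
      obtain ⟨i, hi, rfl⟩ := (pv_enum_mem lines 0 p).1 hpE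
      simp only [hQ, List.any_eq_true, Bool.and_eq_true, decide_eq_true_eq] at hpQ
      obtain ⟨m, hm, hw1, hw2⟩ := hpQ
      refine ⟨⟨by simp, ?_⟩, m, hm, by simpa using hw1, by simpa using hw2⟩
      simp only [zero_add]
      exact_mod_cast hi
    · rintro ⟨⟨h0, hlen⟩, m, hm, hw1, hw2⟩
      have hj : ∃ i : Nat, (i : Int) = j ∧ i < lines.length := by
        refine ⟨j.toNat, by omega, by omega⟩
      obtain ⟨i, hij, hi⟩ := hj
      refine ⟨((0 : Int) + i, lines[i]), ⟨(pv_enum_mem lines 0 _).2 ⟨i, hi, rfl⟩, ?_⟩, by simpa using hij⟩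
      simp only [hQ, List.any_eq_true, Bool.and_eq_true, decide_eq_true_eq]
      exact ⟨m, hm, by simpa [hij] using hw1, by simpa [hij] using hw2⟩
  have hmem : ∀ j : Int, j ∈ S ↔ j ∈ ys := by
    intro j
    rw [hSmem, hysmem]
    constructor
    · rintro ⟨m, hm, h0, hlen, hw1, hw2⟩; exact ⟨⟨h0, hlen⟩, m, hm, hw1, hw2⟩
    · rintro ⟨⟨h0, hlen⟩, m, hm, hw1, hw2⟩; exact ⟨m, hm, h0, hlen, hw1, hw2⟩
  have hysPW : List.Pairwise (fun a b : Int => a < b) ys := by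
    rw [hys, List.pairwise_map]
    exact (pv_enum_pairwise lines 0).filter Q
  have hysND : ys.Nodup := hysPW.imp ne_of_lt
  have hSND : List.Nodup S := by
    rw [hS]
    exact pv_fold_nodup P (fun p => PySem.List.pyRange (max 0 (p.1 - c)) (min (lines.length : Int) (p.1 + c + 1))) E PySem.Set.empty (by simp [PySem.Set.empty])
  have hperm : ys.Perm S := (List.perm_ext_iff_of_nodup hysND hSND).2 (fun a => (hmem a).symm)
  have hsorted : PySem.List.sorted S (fun j => j) = ys :=
    PySem.List.sorted_eq_of_perm_of_pairwise_lt S ys (fun j => j) hperm hysPW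
  have hget : ys.map (fun j => PySem.List.pyGetD lines j []) = (E.filter Q).map (fun p => p.2) := by
    rw [hys, List.map_map]
    refine List.map_congr_left ?_
    intro p hp
    obtain ⟨i, hi, rfl⟩ := (pv_enum_mem lines 0 p).1 (List.mem_filter.1 hp).1
    simp only [Function.comp, zero_add]
    rw [PySem.List.pyGetD_natCast]
    exact List.getD_eq_getElem lines [] hi
  have hempty : S.isEmpty = ((E.filter Q).map (fun p : Int × List Char => p.2)).isEmpty := by
    rcases Bool.eq_false_or_eq_true S.isEmpty with h | h <;> rw [h]
    · -- S is empty, so the filtered list is empty too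
      rw [List.isEmpty_iff] at h
      rw [eq_comm, List.isEmpty_iff, List.map_eq_nil_iff]
      rw [List.eq_nil_iff_forall_not_mem] at h ⊢
      intro p hp
      exact h p.1 ((hmem p.1).2 (List.mem_map.2 ⟨p, List.mem_filter.1 hp |>.1 |> (fun _ => hp), rfl⟩))
    · -- S is nonempty, so the filtered list is nonempty
      rw [List.isEmpty_eq_false_iff_exists_mem] at h
      obtain ⟨j, hj⟩ := h
      rw [eq_comm, List.isEmpty_eq_false_iff_exists_mem]
      obtain ⟨p, hp, _⟩ := List.mem_map.1 ((hmem j).1 hj)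
      exact ⟨p.2, List.mem_map.2 ⟨p, hp, rfl⟩⟩
  rw [hempty]
  by_cases hcase : ((E.filter Q).map (fun p : Int × List Char => p.2)).isEmpty = true
  · rw [if_pos hcase, if_pos hcase]
  · rw [if_neg hcase, if_neg hcase, hsorted, hget]

-- ===== VERDICT (by name: the statement is the Claim_ definition above) =====
theorem extract_relevant_lines_spec : Claim_equal_extract_relevant_lines := by
  intro content keywords context_lines _
  exact pv_main content keywords context_lines
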